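-- pv_equiv track=rewrite | github.com/logflux/logflux | src/logflux/lke.py | gen_tpl
-- ===== SOURCE A (Python) =====
-- def gen_tpl(private, common):
--     assert(len(private) == (len(common)+1))
--
--     words = []
--     for i in range(len(private)-1):
--         for p in private[i]:
--             words.append(None)
--         words.append(common[i])
--
--     for p in private[-1]:
--         words.append(None)
--
--     return words
-- ===== SOURCE B (Python) =====
-- def gen_tpl(private, common):
--     assert(len(private) == (len(common)+1))
--     total = sum(len(p) for p in private) + len(common)
--     words = [None] * total
--     idx = 0
--     for i in range(len(common)):
--         idx += len(private[i])
--         words[idx] = common[i]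
--         idx += 1
--     return words
-- ===== Notes on version B (the rewrite author's own statement) =====
-- stated objective: alternative
-- what changed: B preallocates a [None]*total list from the group lengths and scatters each separator at its computed position, instead of A's element-by-element appending of Nones and separators.
import Mathlib
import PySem

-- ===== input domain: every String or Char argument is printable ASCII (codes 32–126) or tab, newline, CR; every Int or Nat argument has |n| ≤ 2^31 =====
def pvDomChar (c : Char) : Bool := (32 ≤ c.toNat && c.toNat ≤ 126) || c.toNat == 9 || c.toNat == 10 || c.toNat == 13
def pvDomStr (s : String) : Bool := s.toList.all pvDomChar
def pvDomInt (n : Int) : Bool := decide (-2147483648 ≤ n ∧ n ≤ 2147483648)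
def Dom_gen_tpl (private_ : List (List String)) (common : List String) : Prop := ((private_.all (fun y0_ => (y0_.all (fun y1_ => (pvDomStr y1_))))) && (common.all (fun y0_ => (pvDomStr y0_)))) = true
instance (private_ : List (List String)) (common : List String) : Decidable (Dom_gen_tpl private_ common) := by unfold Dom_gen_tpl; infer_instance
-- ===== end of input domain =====

-- B builds the result by preallocating a list of Nones of the exact total length and
-- scattering each separator at its computed position, instead of A's element-by-element appends.

-- ===== PORT A =====
def gen_tpl (private_ : List (List String)) (common : List String) : List (Option String) :=
  let words : List (Option String) := []
  let words := (PySem.List.pyRange 0 ((private_.length : Int) - 1) 1).foldl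
    (fun words i =>
      let words := (PySem.List.pyGetD private_ i []).foldl
        (fun w _ => w ++ [(none : Option String)]) words
      words ++ [some (PySem.List.pyGetD common i "")])
    words
  (PySem.List.pyGetD private_ (-1) []).foldl
    (fun w _ => w ++ [(none : Option String)]) words

-- ===== PORT B =====
def gen_tpl_alt (private_ : List (List String)) (common : List String) : List (Option String) :=
  let total := private_.foldl (fun a p => a + p.length) 0 + common.length
  let words := List.replicate total (none : Option String)
  let st := (PySem.List.pyRange 0 (common.length : Int) 1).foldl
    (fun (st : List (Option String) × Int) i =>
      let idx := st.2 + ((PySem.List.pyGetD private_ i []).length : Int)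
      let words := PySem.List.pySetD st.1 idx (some (PySem.List.pyGetD common i ""))
      (words, idx + 1))
    (words, 0)
  st.1

-- ===== PRECONDITION & SPEC =====
-- A asserts len(private) == len(common)+1 and raises AssertionError otherwise; Pre_ is exactly that.
def Pre_gen_tpl (private_ : List (List String)) (common : List String) : Prop :=
  private_.length = common.length + 1
instance (private_ : List (List String)) (common : List String) : Decidable (Pre_gen_tpl private_ common) := by unfold Pre_gen_tpl; infer_instance

def pvWitness_gen_tpl : List (List String) × List String := ([["a"], [], ["b", "c"]], ["x", "y"])

def Spec_gen_tpl (private_ : List (List String)) (common : List String) (out : List (Option String)) : Prop := out = gen_tpl_alt private_ common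
instance (private_ : List (List String)) (common : List String) (out : List (Option String)) : Decidable (Spec_gen_tpl private_ common out) := by unfold Spec_gen_tpl; infer_instance

-- ===== CLAIM (what is proved, stated in full; the proofs are below) =====
def Claim_equal_gen_tpl : Prop := ∀ (private_ : List (List String)) (common : List String), Dom_gen_tpl private_ common → Pre_gen_tpl private_ common → Spec_gen_tpl private_ common (gen_tpl private_ common)

-- ===== LEMMAS AND PROOFS =====

-- the interleaving both programs compute: Nones for each word of a group, then the separator
def itl : List (List String) → List String → List (Option String)
  | p :: ps, c :: cs => p.map (fun _ => (none : Option String)) ++ some c :: itl ps cs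
  | _, _ => []

theorem itl_take_succ (ps : List (List String)) (cs : List String) (n : Nat)
    (h1 : n < ps.length) (h2 : n < cs.length) :
    itl (ps.take (n+1)) (cs.take (n+1)) =
      itl (ps.take n) (cs.take n) ++ ps[n].map (fun _ => (none : Option String)) ++ [some cs[n]] := by
  induction n generalizing ps cs with
  | zero => cases ps with
    | nil => simp at h1
    | cons p ps => cases cs with
      | nil => simp at h2
      | cons c cs => simp [itl]
  | succ n ih =>
    cases ps with
    | nil => simp at h1
    | cons p ps => cases cs with
      | nil => simp at h2
      | cons c cs =>
        simp only [List.take_succ_cons, itl, List.getElem_cons_succ]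
        rw [ih ps cs (by simpa using h1) (by simpa using h2)]
        simp

theorem itl_length (ps : List (List String)) (cs : List String) (h : ps.length = cs.length) :
    (itl ps cs).length = (ps.map List.length).sum + cs.length := by
  induction ps generalizing cs with
  | nil => cases cs with
    | nil => simp [itl]
    | cons c cs => simp at h
  | cons p ps ih =>
    cases cs with
    | nil => simp at h
    | cons c cs =>
      simp only [itl, List.length_append, List.length_map, List.length_cons, List.map_cons,
        List.sum_cons]
      rw [ih cs (by simpa using h)]
      omega

theorem sum_lens_foldl (ps : List (List String)) (a : Nat) :
    ps.foldl (fun a p => a + p.length) a = a + (ps.map List.length).sum := by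
  induction ps generalizing a with
  | nil => simp
  | cons p ps ih => simp [List.foldl, ih]; omega

theorem lemA (ps : List (List String)) (cs : List String) (n : Nat)
    (h1 : n ≤ ps.length) (h2 : n ≤ cs.length) (w : List (Option String)) :
    (PySem.List.pyRange 0 (n : Int) 1).foldl
      (fun words i =>
        let words := (PySem.List.pyGetD ps i []).foldl
          (fun w _ => w ++ [(none : Option String)]) words
        words ++ [some (PySem.List.pyGetD cs i "")]) w
    = w ++ itl (ps.take n) (cs.take n) := by
  induction n generalizing w with
  | zero => simp [PySem.List.pyRange_one_eq_nil, itl]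
  | succ n ih =>
    have hcast : ((n + 1 : Nat) : Int) = (n : Int) + 1 := by push_cast; ring
    rw [hcast, PySem.List.pyRange_one_succ_right (by positivity), List.foldl_append]
    rw [ih (by omega) (by omega)]
    simp only [List.foldl]
    have hg : PySem.List.pyGetD ps (n : Int) [] = ps[n] := by
      simp [PySem.List.pyGetD_natCast, List.getD_eq_getElem?_getD, List.getElem?_eq_getElem (by omega : n < ps.length)]
      rfl
    have hc : PySem.List.pyGetD cs (n : Int) "" = cs[n] := by
      simp [PySem.List.pyGetD_natCast, List.getD_eq_getElem?_getD, List.getElem?_eq_getElem (by omega : n < cs.length)]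
      rfl
    rw [hg, hc, PySem.List.foldl_append_singleton_eq_map]
    rw [itl_take_succ ps cs n (by omega) (by omega)]
    simp
    exact ⟨rfl, rfl⟩

theorem nones_foldl (p : List String) (w : List (Option String)) :
    p.foldl (fun w _ => w ++ [(none : Option String)]) w
      = w ++ p.map (fun _ => (none : Option String)) := by
  induction p generalizing w with
  | nil => simp
  | cons x p ih => simp [List.foldl, ih]

theorem genA_eq (ps : List (List String)) (cs : List String) (h : ps.length = cs.length + 1) :
    gen_tpl ps cs =
      itl (ps.take cs.length) cs ++
        (ps.getLast (by intro hnil; simp [hnil] at h)).map (fun _ => (none : Option String)) := by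
  have hne : ps ≠ [] := by intro hnil; simp [hnil] at h
  dsimp only [gen_tpl]
  have hlen : ((ps.length : Int) - 1) = (cs.length : Int) := by omega
  rw [hlen, lemA ps cs cs.length (by omega) (by omega), nones_foldl,
      PySem.List.pyGetD_neg_one ps [] hne]
  simp

theorem sum_take_lens (ps : List (List String)) (n : Nat) (h : n < ps.length) :
    ((ps.take (n+1)).map List.length).sum = ((ps.take n).map List.length).sum + ps[n].length := by
  have := List.sum_take_succ (ps.map List.length) n (by simpa using h)
  simpa using this

theorem sum_take_le (ps : List (List String)) (n : Nat) :
    ((ps.take n).map List.length).sum ≤ (ps.map List.length).sum := by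
  conv_rhs => rw [← List.take_append_drop n ps]
  rw [List.map_append, List.sum_append]
  exact Nat.le_add_right _ _

theorem set_replicate {v : Option String} (m g : Nat) (hv : g < m) :
    (List.replicate m (none : Option String)).set g v
      = List.replicate g none ++ v :: List.replicate (m - g - 1) none := by
  induction g generalizing m with
  | zero =>
    cases m with
    | zero => omega
    | succ m => simp [List.replicate_succ]
  | succ g ih =>
    cases m with
    | zero => omega
    | succ m =>
      simp only [List.replicate_succ, List.set_cons_succ, ih m (by omega)]
      simp

theorem lemB (ps : List (List String)) (cs : List String) (hlen : ps.length = cs.length + 1)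
    (n : Nat) (h : n ≤ cs.length) :
    (PySem.List.pyRange 0 (n : Int) 1).foldl
      (fun (st : List (Option String) × Int) i =>
        let idx := st.2 + ((PySem.List.pyGetD ps i []).length : Int)
        let words := PySem.List.pySetD st.1 idx (some (PySem.List.pyGetD cs i ""))
        (words, idx + 1))
      (List.replicate ((ps.map List.length).sum + cs.length) (none : Option String), 0)
    = (itl (ps.take n) (cs.take n) ++
        List.replicate ((ps.map List.length).sum + cs.length
          - (((ps.take n).map List.length).sum + n)) (none : Option String),
       ((((ps.take n).map List.length).sum + n : Nat) : Int)) := by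
  induction n with
  | zero => simp [PySem.List.pyRange_one_eq_nil, itl]
  | succ n ih =>
    have hn : n < cs.length := by omega
    have hnp : n < ps.length := by omega
    have hcast : ((n + 1 : Nat) : Int) = (n : Int) + 1 := by push_cast; ring
    rw [hcast, PySem.List.pyRange_one_succ_right (by positivity), List.foldl_append,
      ih (by omega)]
    simp only [List.foldl]
    have hg : PySem.List.pyGetD ps (n : Int) [] = ps[n] := by
      simp [PySem.List.pyGetD_natCast, List.getD_eq_getElem?_getD,
        List.getElem?_eq_getElem hnp]
      try rfl
    have hc : PySem.List.pyGetD cs (n : Int) "" = cs[n] := by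
      simp [PySem.List.pyGetD_natCast, List.getD_eq_getElem?_getD,
        List.getElem?_eq_getElem hn]
      try rfl
    rw [hg, hc]
    set K := ((ps.take n).map List.length).sum + n with hK
    set g := ps[n].length with hgdef
    set T := (ps.map List.length).sum + cs.length with hT
    have hsum1 : ((ps.take (n+1)).map List.length).sum = ((ps.take n).map List.length).sum + g :=
      sum_take_lens ps n hnp
    have hsumle : ((ps.take (n+1)).map List.length).sum ≤ (ps.map List.length).sum :=
      sum_take_le ps (n+1)
    have hroom : K + g + 1 ≤ T := by omega
    have hPlen : (itl (ps.take n) (cs.take n)).length = K := by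
      rw [itl_length _ _ (by simp; omega)]
      simp [hK]
      omega
    have hidx : ((K : Int) + (g : Int)) = ((K + g : Nat) : Int) := by push_cast; ring
    rw [hidx, PySem.List.pySetD_natCast]
    rw [← hPlen] at hroom ⊢
    rw [List.set_append_right _ _ (by omega)]
    have hsub : K + g - (itl (ps.take n) (cs.take n)).length = g := by omega
    rw [hsub, hPlen] at *
    rw [set_replicate _ _ (by omega)]
    rw [itl_take_succ ps cs n hnp hn, Prod.mk.injEq]
    constructor
    · have e2 : T - K - (K + g - K) - 1
          = T - ((List.map List.length (List.take (n+1) ps)).sum + (n+1)) := by omega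
      have e1 : K + g - K = g := by omega
      rw [e2, e1]
      simp [List.map_const', hgdef]
    · have e3 : (List.map List.length (List.take (n+1) ps)).sum + (n+1) = K + g + 1 := by omega
      rw [e3]
      push_cast
      ring

theorem genB_eq (ps : List (List String)) (cs : List String) (h : ps.length = cs.length + 1) :
    gen_tpl_alt ps cs =
      itl (ps.take cs.length) cs ++
        (ps.getLast (by intro hnil; simp [hnil] at h)).map (fun _ => (none : Option String)) := by
  have hne : ps ≠ [] := by intro hnil; simp [hnil] at h
  dsimp only [gen_tpl_alt]
  rw [sum_lens_foldl, Nat.zero_add, lemB ps cs h cs.length le_rfl]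
  have htake : ps.take cs.length = ps.dropLast := by
    rw [List.dropLast_eq_take, h]
    simp
  have hps : ps.take cs.length ++ [ps.getLast hne] = ps := by
    rw [htake]
    exact List.dropLast_append_getLast hne
  have hsum : (ps.map List.length).sum
      = ((ps.take cs.length).map List.length).sum + (ps.getLast hne).length := by
    conv_lhs => rw [← hps]
    simp
  simp only [List.take_length]
  congr 1
  rw [hsum]
  simp [List.map_const']
  omega

-- ===== VERDICT (by name: the statement is the Claim_ definition above) =====
theorem gen_tpl_spec : Claim_equal_gen_tpl := by
  intro ps cs _ hpre
  unfold Spec_gen_tpl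
  rw [genA_eq ps cs hpre, genB_eq ps cs hpre]
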